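-- pv_equiv track=rewrite | github.com/t-koba-96/TCNModels | utils/datas.py | train_path_list
-- ===== SOURCE A (Python) =====
-- def train_path_list(number):
--
--     video_list=[]
--     l_cutout_list=[]
--     r_cutout_list=[]
--     label_list=[]
--     pose_list=[]
--
--     video_path_list=["../../../local/dataset/work_detect/mogi_data/worker_a/image_a/train/",
--                      "../../../local/dataset/work_detect/mogi_data/worker_b/image_b/train/",
--                      "../../../local/dataset/work_detect/mogi_data/worker_c/image_c/train/",
--                      "../../../local/dataset/work_detect/mogi_data/worker_d/image_d/train/",
--                      "../../../local/dataset/work_detect/mogi_data/worker_e/image_e/train/"]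
--
--     left_cutout_path_list=["../../../local/dataset/work_detect/mogi_data/worker_a/cutout_image_a/left/train/",
--                            "../../../local/dataset/work_detect/mogi_data/worker_b/cutout_image_b/left/train/",
--                            "../../../local/dataset/work_detect/mogi_data/worker_c/cutout_image_c/left/train/",
--                            "../../../local/dataset/work_detect/mogi_data/worker_d/cutout_image_d/left/train/",
--                            "../../../local/dataset/work_detect/mogi_data/worker_e/cutout_image_e/left/train/"]
--
--     right_cutout_path_list=["../../../local/dataset/work_detect/mogi_data/worker_a/cutout_image_a/right/train/",
--                            "../../../local/dataset/work_detect/mogi_data/worker_b/cutout_image_b/right/train/",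
--                            "../../../local/dataset/work_detect/mogi_data/worker_c/cutout_image_c/right/train/",
--                            "../../../local/dataset/work_detect/mogi_data/worker_d/cutout_image_d/right/train/",
--                            "../../../local/dataset/work_detect/mogi_data/worker_e/cutout_image_e/right/train/"]
--
--     label_path_list=["../../../local/dataset/work_detect/mogi_data/worker_a/class_a/train.csv",
--                      "../../../local/dataset/work_detect/mogi_data/worker_b/class_b/train.csv",
--                      "../../../local/dataset/work_detect/mogi_data/worker_c/class_c/train.csv",
--                      "../../../local/dataset/work_detect/mogi_data/worker_d/class_d/train.csv",
--                      "../../../local/dataset/work_detect/mogi_data/worker_e/class_e/train.csv"]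
--
--     pose_path_list=[ "../../../local/dataset/work_detect/mogi_data/worker_a/pose_a/train.csv",
--                      "../../../local/dataset/work_detect/mogi_data/worker_b/pose_b/train.csv",
--                      "../../../local/dataset/work_detect/mogi_data/worker_c/pose_c/train.csv",
--                      "../../../local/dataset/work_detect/mogi_data/worker_d/pose_d/train.csv",
--                      "../../../local/dataset/work_detect/mogi_data/worker_e/pose_e/train.csv"]
--
--     for data in number:
--        video_list.append(video_path_list[data-1])
--        l_cutout_list.append(left_cutout_path_list[data-1])
--        r_cutout_list.append(right_cutout_path_list[data-1])
--        label_list.append(label_path_list[data-1])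
--        pose_list.append(pose_path_list[data-1])
--
--     return video_list,l_cutout_list,r_cutout_list,label_list,pose_list
-- ===== SOURCE B (Python) =====
-- def train_path_list(number):
--     base = "../../../local/dataset/work_detect/mogi_data/worker_"
--     xs = [chr(ord('a') + (d - 1) % 5) for d in number]
--     tmpls = ["{0}/image_{0}/train/",
--              "{0}/cutout_image_{0}/left/train/",
--              "{0}/cutout_image_{0}/right/train/",
--              "{0}/class_{0}/train.csv",
--              "{0}/pose_{0}/train.csv"]
--     v, l, r, c, p = ([base + t.format(x) for x in xs] for t in tmpls)
--     return v, l, r, c, p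
-- ===== Notes on version B (the rewrite author's own statement) =====
-- stated objective: alternative
-- what changed: Eliminates all five hardcoded path tables: the worker letter is computed arithmetically with chr(ord('a')+(d-1)%5) (floor-mod reproduces Python's negative-index wraparound), and the loop nest is transposed - an outer pass over five path templates with an inner pass over the letters, instead of one pass over number appending five table lookups.
import Mathlib
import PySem

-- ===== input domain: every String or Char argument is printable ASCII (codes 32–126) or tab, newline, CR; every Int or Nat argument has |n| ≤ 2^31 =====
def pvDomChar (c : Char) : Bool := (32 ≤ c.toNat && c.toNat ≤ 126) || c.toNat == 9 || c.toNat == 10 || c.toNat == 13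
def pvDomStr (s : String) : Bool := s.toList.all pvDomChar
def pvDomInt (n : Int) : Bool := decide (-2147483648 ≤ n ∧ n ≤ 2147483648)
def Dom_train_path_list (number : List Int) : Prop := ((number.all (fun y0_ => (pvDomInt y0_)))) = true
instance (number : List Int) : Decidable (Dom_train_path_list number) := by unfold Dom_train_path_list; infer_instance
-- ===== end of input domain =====

-- B drops the path tables: worker letters come from modular arithmetic and the loop nest is transposed (templates outer, elements inner); same return value on Pre_.

-- ===== PORT A =====
def train_path_list (number : List Int) : List String × List String × List String × List String × List String :=
  let video_path_list : List String :=
    ["../../../local/dataset/work_detect/mogi_data/worker_a/image_a/train/",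
     "../../../local/dataset/work_detect/mogi_data/worker_b/image_b/train/",
     "../../../local/dataset/work_detect/mogi_data/worker_c/image_c/train/",
     "../../../local/dataset/work_detect/mogi_data/worker_d/image_d/train/",
     "../../../local/dataset/work_detect/mogi_data/worker_e/image_e/train/"]
  let left_cutout_path_list : List String :=
    ["../../../local/dataset/work_detect/mogi_data/worker_a/cutout_image_a/left/train/",
     "../../../local/dataset/work_detect/mogi_data/worker_b/cutout_image_b/left/train/",
     "../../../local/dataset/work_detect/mogi_data/worker_c/cutout_image_c/left/train/",
     "../../../local/dataset/work_detect/mogi_data/worker_d/cutout_image_d/left/train/",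
     "../../../local/dataset/work_detect/mogi_data/worker_e/cutout_image_e/left/train/"]
  let right_cutout_path_list : List String :=
    ["../../../local/dataset/work_detect/mogi_data/worker_a/cutout_image_a/right/train/",
     "../../../local/dataset/work_detect/mogi_data/worker_b/cutout_image_b/right/train/",
     "../../../local/dataset/work_detect/mogi_data/worker_c/cutout_image_c/right/train/",
     "../../../local/dataset/work_detect/mogi_data/worker_d/cutout_image_d/right/train/",
     "../../../local/dataset/work_detect/mogi_data/worker_e/cutout_image_e/right/train/"]
  let label_path_list : List String :=
    ["../../../local/dataset/work_detect/mogi_data/worker_a/class_a/train.csv",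
     "../../../local/dataset/work_detect/mogi_data/worker_b/class_b/train.csv",
     "../../../local/dataset/work_detect/mogi_data/worker_c/class_c/train.csv",
     "../../../local/dataset/work_detect/mogi_data/worker_d/class_d/train.csv",
     "../../../local/dataset/work_detect/mogi_data/worker_e/class_e/train.csv"]
  let pose_path_list : List String :=
    ["../../../local/dataset/work_detect/mogi_data/worker_a/pose_a/train.csv",
     "../../../local/dataset/work_detect/mogi_data/worker_b/pose_b/train.csv",
     "../../../local/dataset/work_detect/mogi_data/worker_c/pose_c/train.csv",
     "../../../local/dataset/work_detect/mogi_data/worker_d/pose_d/train.csv",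
     "../../../local/dataset/work_detect/mogi_data/worker_e/pose_e/train.csv"]
  -- the loop; pyGet? = Python list indexing (Pre_ excludes the IndexError cases, so .getD "" is never taken)
  number.foldl
    (fun acc data =>
      (acc.1 ++ [(PySem.List.pyGet? video_path_list (data - 1)).getD ""],
       acc.2.1 ++ [(PySem.List.pyGet? left_cutout_path_list (data - 1)).getD ""],
       acc.2.2.1 ++ [(PySem.List.pyGet? right_cutout_path_list (data - 1)).getD ""],
       acc.2.2.2.1 ++ [(PySem.List.pyGet? label_path_list (data - 1)).getD ""],
       acc.2.2.2.2 ++ [(PySem.List.pyGet? pose_path_list (data - 1)).getD ""]))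
    ([], [], [], [], [])

-- ===== PORT B =====
-- chr(ord('a') + (d-1) % 5): Python floor-mod of a positive divisor = PySem.Int.mod; result in [0,5) so toNat is exact
def pvLetterOf (d : Int) : String := String.ofList [Char.ofNat ('a'.toNat + (PySem.Int.mod (d - 1) 5).toNat)]
def pvBase : String := "../../../local/dataset/work_detect/mogi_data/worker_"
-- t.format(x) on templates whose only field is "{0}" = replace every "{0}" with x (exact)
def pvFmt (xs : List String) (t : String) : List String :=
  xs.map (fun x => pvBase ++ PySem.Str.replace t "{0}" x)
def train_path_list_alt (number : List Int) : List String × List String × List String × List String × List String :=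
  let xs := number.map pvLetterOf
  (pvFmt xs "{0}/image_{0}/train/",
   pvFmt xs "{0}/cutout_image_{0}/left/train/",
   pvFmt xs "{0}/cutout_image_{0}/right/train/",
   pvFmt xs "{0}/class_{0}/train.csv",
   pvFmt xs "{0}/pose_{0}/train.csv")

-- ===== PRECONDITION & SPEC =====
-- Pre_ excludes exactly the indices on which Python's list indexing in A (tables of length 5, index data-1,
-- negative wraparound allowed) raises IndexError.
def Pre_train_path_list (number : List Int) : Prop := ∀ d ∈ number, -4 ≤ d ∧ d ≤ 5
instance (number : List Int) : Decidable (Pre_train_path_list number) := by unfold Pre_train_path_list; infer_instance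
def pvWitness_train_path_list : List Int := [1, 2, 3, 4, 5, 0, -4]
def Spec_train_path_list (number : List Int) (out : List String × List String × List String × List String × List String) : Prop := out = train_path_list_alt number
instance (number : List Int) (out : List String × List String × List String × List String × List String) : Decidable (Spec_train_path_list number out) := by unfold Spec_train_path_list; infer_instance

-- ===== CLAIM =====
def Claim_equal_train_path_list : Prop := ∀ (number : List Int), Dom_train_path_list number → Pre_train_path_list number → Spec_train_path_list number (train_path_list number)

-- ===== LEMMAS AND PROOFS =====

-- A's five-accumulator append loop equals the five maps of its per-element lookups.
theorem pv_foldl5 (f1 f2 f3 f4 f5 : Int → String) :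
    ∀ (l : List Int) (a b c d e : List String),
      l.foldl (fun acc data =>
          (acc.1 ++ [f1 data], acc.2.1 ++ [f2 data], acc.2.2.1 ++ [f3 data],
           acc.2.2.2.1 ++ [f4 data], acc.2.2.2.2 ++ [f5 data])) (a, b, c, d, e)
        = (a ++ l.map f1, b ++ l.map f2, c ++ l.map f3, d ++ l.map f4, e ++ l.map f5) := by
  intro l
  induction l with
  | nil => intro a b c d e; simp
  | cons x t ih => intro a b c d e; simp [List.foldl_cons, ih]

theorem train_path_list_spec : Claim_equal_train_path_list := by
  intro number _ hpre
  unfold Spec_train_path_list train_path_list train_path_list_alt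
  simp only [pv_foldl5, List.nil_append, pvFmt, List.map_map]
  refine Prod.ext ?_ (Prod.ext ?_ (Prod.ext ?_ (Prod.ext ?_ ?_))) <;>
    · refine List.map_congr_left (fun d hd => ?_)
      obtain ⟨h1, h2⟩ := hpre d hd
      simp only [Function.comp]
      interval_cases d <;> decide
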